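-- pv_equiv track=rewrite | github.com/postvakje/oeis-sequences | oeis-sequences/OEISsequences.py | A163574_helper
-- ===== SOURCE A (Python) =====
-- def A163574_helper(n, b):
--     if n == 1:
--         t = list(range(1, b))
--         for i in range(1, b):
--             u = list(t)
--             u.remove(i)
--             yield i, u
--     else:
--         for d, v in A163574_helper(n - 1, b):
--             for g in v:
--                 k = d * b + g
--                 if not k % n:
--                     u = list(v)
--                     u.remove(g)
--                     yield k, u
-- ===== SOURCE B (Python) =====
-- def _without(v, g):
--     u = list(v)
--     u.remove(g)
--     return u
--
--
-- def A163574_helper(n, b):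
--     # Iterative worklist instead of recursion: build level 1, then advance
--     # one divisibility step at a time, finally yield the last level.
--     digits = list(range(1, b))
--     level = [(i, _without(digits, i)) for i in digits]
--     for step in range(2, n + 1):
--         level = [(d * b + g, _without(v, g))
--                  for d, v in level for g in v if (d * b + g) % step == 0]
--     yield from level
-- ===== Notes on version B (the rewrite author's own statement) =====
-- stated objective: alternative
-- what changed: Replaced the recursive generator (which rebuilds each level by recursing on n-1) with an iterative bottom-up worklist: build the level-1 list once, then fold the divisibility step over range(2, n+1) using list comprehensions.
import Mathlib
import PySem

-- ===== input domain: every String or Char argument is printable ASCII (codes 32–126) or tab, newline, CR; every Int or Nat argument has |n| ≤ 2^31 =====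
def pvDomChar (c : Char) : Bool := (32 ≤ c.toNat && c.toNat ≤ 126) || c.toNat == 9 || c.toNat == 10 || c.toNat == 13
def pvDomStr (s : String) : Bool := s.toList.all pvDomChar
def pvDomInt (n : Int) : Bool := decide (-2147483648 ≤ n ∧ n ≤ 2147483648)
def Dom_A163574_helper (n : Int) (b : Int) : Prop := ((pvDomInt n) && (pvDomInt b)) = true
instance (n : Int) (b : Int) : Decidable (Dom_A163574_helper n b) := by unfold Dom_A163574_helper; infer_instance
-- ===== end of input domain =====

-- B replaces A's recursive generator by an iterative bottom-up worklist (fold over range(2,n+1)); same output, same cost, no recursion.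

-- ===== PORT A =====
-- A recurses on n-1; ported with n.toNat as the structural measure (for n ≤ 0 the
-- Python recursion never terminates — excluded by Pre_).  u = list(v); u.remove(x)
-- is PySem.List.remove?; the element removed is always present, so getD [] is never hit.
def aGen : Nat → Int → List (Int × List Int)
  | 0, _ => []
  | 1, b =>
      let t := PySem.List.pyRange 1 b 1
      (PySem.List.pyRange 1 b 1).foldl (fun acc i =>
        let u := (PySem.List.remove? t i).getD []
        acc ++ [(i, u)]) []
  | (m+2), b =>
      (aGen (m+1) b).foldl (fun acc dv =>
        dv.2.foldl (fun acc g =>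
          let k := dv.1 * b + g
          if PySem.Int.mod k ((m : Int) + 2) == 0 then
            acc ++ [(k, (PySem.List.remove? dv.2 g).getD [])]
          else acc) acc) []

def A163574_helper (n : Int) (b : Int) : List (Int × List Int) := aGen n.toNat b

-- ===== PORT B =====
-- _without(v, g): copy of v with the first occurrence of g removed
def bWithout (v : List Int) (g : Int) : List Int := (PySem.List.remove? v g).getD []

def A163574_helper_alt (n : Int) (b : Int) : List (Int × List Int) :=
  let digits := PySem.List.pyRange 1 b 1
  let level0 := digits.map (fun i => (i, bWithout digits i))
  (PySem.List.pyRange 2 (n + 1) 1).foldl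
    (fun level step =>
      level.flatMap (fun dv =>
        (dv.2.filter (fun g => PySem.Int.mod (dv.1 * b + g) step == 0)).map
          (fun g => (dv.1 * b + g, bWithout dv.2 g))))
    level0

-- ===== PRECONDITION & SPEC =====
-- Pre_ excludes n ≤ 0, on which the Python A recurses without bound (RecursionError).
def Pre_A163574_helper (n : Int) (b : Int) : Prop := 1 ≤ n
instance (n : Int) (b : Int) : Decidable (Pre_A163574_helper n b) := by unfold Pre_A163574_helper; infer_instance
def pvWitness_A163574_helper : Int × Int := (3, 5)

def Spec_A163574_helper (n : Int) (b : Int) (out : List (Int × List Int)) : Prop := out = A163574_helper_alt n b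
instance (n : Int) (b : Int) (out : List (Int × List Int)) : Decidable (Spec_A163574_helper n b out) := by unfold Spec_A163574_helper; infer_instance

-- ===== CLAIM (what is proved, stated in full; the proofs are below) =====
def Claim_equal_A163574_helper : Prop := ∀ (n : Int) (b : Int), Dom_A163574_helper n b → Pre_A163574_helper n b → Spec_A163574_helper n b (A163574_helper n b)

-- ===== LEMMAS AND PROOFS =====

-- B's one-step transition, named for the proofs
def bStep (b : Int) (level : List (Int × List Int)) (step : Int) : List (Int × List Int) :=
  level.flatMap (fun dv =>
    (dv.2.filter (fun g => PySem.Int.mod (dv.1 * b + g) step == 0)).map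
      (fun g => (dv.1 * b + g, bWithout dv.2 g)))

lemma foldl_append_map {α β : Type} (f : α → β) (l : List α) :
    ∀ (acc : List β), l.foldl (fun acc x => acc ++ [f x]) acc = acc ++ l.map f := by
  induction l with
  | nil => intro acc; simp
  | cons x t ih => intro acc; simp [ih]

lemma foldl_if_append {α β : Type} (p : α → Bool) (f : α → β) (l : List α) :
    ∀ (acc : List β),
      l.foldl (fun acc x => if p x then acc ++ [f x] else acc) acc
        = acc ++ (l.filter p).map f := by
  induction l with
  | nil => intro acc; simp
  | cons x t ih => intro acc; by_cases h : p x <;> simp [h, ih]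

lemma foldl_append_flat {α β : Type} (g : α → List β) (l : List α) :
    ∀ (acc : List β), l.foldl (fun acc x => acc ++ g x) acc = acc ++ l.flatMap g := by
  induction l with
  | nil => intro acc; simp
  | cons x t ih => intro acc; simp [ih]

lemma aGen_one (b : Int) :
    aGen 1 b = (PySem.List.pyRange 1 b 1).map
      (fun i => (i, bWithout (PySem.List.pyRange 1 b 1) i)) := by
  show (PySem.List.pyRange 1 b 1).foldl
      (fun acc i => acc ++ [(i, bWithout (PySem.List.pyRange 1 b 1) i)]) [] = _
  rw [foldl_append_map]
  rfl

lemma aGen_step (m : Nat) (b : Int) :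
    aGen (m + 2) b = bStep b (aGen (m + 1) b) ((m : Int) + 2) := by
  show (aGen (m + 1) b).foldl (fun acc dv =>
      dv.2.foldl (fun acc g =>
        if PySem.Int.mod (dv.1 * b + g) ((m : Int) + 2) == 0 then
          acc ++ [(dv.1 * b + g, bWithout dv.2 g)]
        else acc) acc) [] = _
  refine Eq.trans (PySem.List.foldl_congr_mem (aGen (m + 1) b) _
      (fun acc dv => acc ++
        ((dv.2.filter (fun g => PySem.Int.mod (dv.1 * b + g) ((m : Int) + 2) == 0)).map
          (fun g => (dv.1 * b + g, bWithout dv.2 g)))) [] ?_) ?_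
  · intro acc dv _
    exact foldl_if_append
      (fun g => PySem.Int.mod (dv.1 * b + g) ((m : Int) + 2) == 0)
      (fun g => (dv.1 * b + g, bWithout dv.2 g)) dv.2 acc
  · rw [foldl_append_flat]
    rfl

-- main invariant: level m+1 of A equals B's fold up to step m+1
lemma aGen_eq_fold (m : Nat) (b : Int) :
    aGen (m + 1) b = (PySem.List.pyRange 2 ((m : Int) + 2) 1).foldl (bStep b)
      ((PySem.List.pyRange 1 b 1).map (fun i => (i, bWithout (PySem.List.pyRange 1 b 1) i))) := by
  induction m with
  | zero =>
      rw [show PySem.List.pyRange 2 (((0 : Nat) : Int) + 2) 1 = []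
            from PySem.List.pyRange_one_eq_nil (by omega)]
      exact aGen_one b
  | succ k ih =>
      have hc : (((k + 1 : Nat)) : Int) + 2 = ((k : Int) + 2) + 1 := by push_cast; ring
      rw [show aGen (k + 1 + 1) b = bStep b (aGen (k + 1) b) ((k : Int) + 2) from aGen_step k b]
      rw [ih, hc, PySem.List.pyRange_one_succ_right (by omega), List.foldl_append]
      rfl

-- ===== VERDICT (by name: the statement is the Claim_ definition above) =====
theorem A163574_helper_spec : Claim_equal_A163574_helper := by
  intro n b _ hpre
  unfold Pre_A163574_helper at hpre
  unfold Spec_A163574_helper A163574_helper A163574_helper_alt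
  obtain ⟨m, hm⟩ : ∃ m : Nat, n.toNat = m + 1 := ⟨(n - 1).toNat, by omega⟩
  have hcast : ((m : Int) + 2) = n + 1 := by omega
  rw [hm, aGen_eq_fold m b, hcast]
  rfl
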